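-- pv_equiv track=rewrite | github.com/blouxongit/crossbow_project | src/post_detecting_functions.py | circle_detector_post_processing_per_camera
-- ===== SOURCE A (Python) =====
-- def circle_detector_post_processing_per_camera(detections):
--     suspects = []
--     invalid_detections = []
--
--     for detection in detections:
--         if len(detection) > 1:
--             suspects.extend(detection)
--
--     for suspect in suspects:
--         if (
--             suspects.count(suspect) > 2
--         ):  # In theory, we could put 1, but we give a margin for error. We consider that if we get more than 2 times the exact same detection point, then it is not an actual detection point.
--             invalid_detections.append(suspect)
--
--     for invalid_detection in invalid_detections:
--         for detection in detections:
--             if invalid_detection in detection: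
--                 detection.remove(invalid_detection)
--
--     cleaned_detections = []
--     for detection in detections:
--         cleaned_detections.append(detection if len(detection) == 1 else [])
--
--     return cleaned_detections
-- ===== SOURCE B (Python) =====
-- def circle_detector_post_processing_per_camera(detections):
--     # Count each point across all multi-point detections in one pass.
--     counts = {}
--     for detection in detections:
--         if len(detection) > 1:
--             for point in detection:
--                 counts[point] = counts.get(point, 0) + 1
--     invalid = {point for point, k in counts.items() if k > 2}
--     # One filtering pass: a point seen more than twice is dropped everywhere.
--     result = []
--     for detection in detections:
--         kept = [p for p in detection if p not in invalid]
--         result.append(kept if len(kept) == 1 else [])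
--     return result
-- ===== Notes on version B (the rewrite author's own statement) =====
-- stated objective: faster
-- what changed: Replaces A's quadratic suspects.count scan and the repeated remove-over-all-detections loop by one dict-counting pass over the multi-point detections and one filtering pass that drops every point counted more than twice.
import Mathlib
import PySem

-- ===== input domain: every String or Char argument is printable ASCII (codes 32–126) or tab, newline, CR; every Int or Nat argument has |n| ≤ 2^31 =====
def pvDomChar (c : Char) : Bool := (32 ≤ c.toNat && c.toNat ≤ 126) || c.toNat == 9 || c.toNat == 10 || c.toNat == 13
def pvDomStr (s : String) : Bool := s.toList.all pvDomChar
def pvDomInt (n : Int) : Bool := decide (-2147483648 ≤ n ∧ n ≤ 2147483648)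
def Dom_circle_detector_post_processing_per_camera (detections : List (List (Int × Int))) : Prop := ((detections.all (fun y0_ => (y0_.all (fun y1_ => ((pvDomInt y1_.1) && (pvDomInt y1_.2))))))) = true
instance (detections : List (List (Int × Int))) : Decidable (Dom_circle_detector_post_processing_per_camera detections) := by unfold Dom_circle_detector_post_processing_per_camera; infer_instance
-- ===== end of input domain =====

-- B replaces A's quadratic suspects.count scan and its repeated remove-loop by one counting
-- pass plus one filtering pass (objective: faster). A mutates the input lists in place and B
-- does not; the equivalence proved here is about the RETURN value only.

-- ===== PORT A =====
def circle_detector_post_processing_per_camera (detections : List (List (Int × Int))) : List (List (Int × Int)) :=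
  let suspects : List (Int × Int) :=
    detections.foldl (fun s d => if d.length > 1 then s ++ d else s) []
  let invalid_detections : List (Int × Int) :=
    suspects.foldl (fun inv s => if suspects.count s > 2 then inv ++ [s] else inv) []
  let dets : List (List (Int × Int)) :=
    invalid_detections.foldl (fun ds v =>
      ds.map (fun d => if v ∈ d then d.erase v else d)) detections
  dets.foldl (fun c d => c ++ [if d.length == 1 then d else []]) []

-- ===== PORT B =====
def circle_detector_post_processing_per_camera_alt (detections : List (List (Int × Int))) : List (List (Int × Int)) :=
  let counts : PySem.Dict (Int × Int) Int :=
    detections.foldl (fun c d =>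
      if d.length > 1 then d.foldl (fun c p => c.modify p 0 (· + 1)) c else c) PySem.Dict.empty
  let invalid : PySem.Set (Int × Int) :=
    PySem.Set.ofList ((counts.items.filter (fun kv => kv.2 > 2)).map (·.1))
  detections.foldl (fun r d =>
    let kept := d.filter (fun p => !(PySem.Set.contains invalid p))
    r ++ [if kept.length == 1 then kept else []]) []

-- ===== PRECONDITION & SPEC =====
def Spec_circle_detector_post_processing_per_camera (detections : List (List (Int × Int))) (out : List (List (Int × Int))) : Prop := out = circle_detector_post_processing_per_camera_alt detections
instance (detections : List (List (Int × Int))) (out : List (List (Int × Int))) : Decidable (Spec_circle_detector_post_processing_per_camera detections out) := by unfold Spec_circle_detector_post_processing_per_camera; infer_instance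

-- ===== CLAIM (what is proved, stated in full; the proofs are below) =====
def Claim_equal_circle_detector_post_processing_per_camera : Prop := ∀ (detections : List (List (Int × Int))), Dom_circle_detector_post_processing_per_camera detections → Spec_circle_detector_post_processing_per_camera detections (circle_detector_post_processing_per_camera detections)

-- ===== LEMMAS AND PROOFS =====

-- folding a map over the detections list commutes to mapping the inner fold
lemma pv_foldl_map_comm (I : List (Int × Int)) (g : (Int × Int) → List (Int × Int) → List (Int × Int))
    (ds : List (List (Int × Int))) :
    I.foldl (fun ds v => ds.map (g v)) ds = ds.map (fun d => I.foldl (fun d v => g v d) d) := by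
  induction I generalizing ds with
  | nil => simp
  | cons v I ih => simp [List.foldl_cons, ih, List.map_map, Function.comp]

-- erasing an element the filter already drops does not change the filtered list
lemma pv_filter_erase (p : (Int × Int) → Bool) (v : Int × Int) (d : List (Int × Int))
    (hv : p v = false) : (d.erase v).filter p = d.filter p := by
  induction d with
  | nil => simp
  | cons a t ih =>
    by_cases h : a = v
    · subst h; simp [List.erase_cons_head, hv]
    · rw [List.erase_cons_tail (by simp [h]), List.filter_cons, List.filter_cons, ih]

-- an element occurring at most once: erase = filter-out
lemma pv_erase_eq_filter (v : Int × Int) (d : List (Int × Int))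
    (h : d.count v ≤ 1) : d.erase v = d.filter (fun p => !(p == v)) := by
  induction d with
  | nil => simp
  | cons a t ih =>
    by_cases ha : a = v
    · subst ha
      have ht : t.count a = 0 := by
        have : (a :: t).count a = t.count a + 1 := List.count_cons_self
        omega
      rw [List.erase_cons_head]
      have hfa : t.filter (fun p => !(p == a)) = t := by
        apply List.filter_eq_self.mpr
        intro x hx
        by_cases hxa : x = a
        · exact absurd (hxa ▸ hx) (List.count_eq_zero.mp ht)
        · simp [hxa]
      simp [hfa]
    · have hc : t.count v ≤ 1 := by
        have : (a :: t).count v = t.count v := List.count_cons_of_ne ha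
        omega
      rw [List.erase_cons_tail (by simp [ha]), List.filter_cons, ih hc]
      simp [ha]

-- the core removal lemma: folding erase over I removes exactly the members of I,
-- provided I contains each of its values at least as often as d does
lemma pv_erase_fold (I : List (Int × Int)) (d : List (Int × Int))
    (H : ∀ v ∈ I, d.count v ≤ I.count v) :
    I.foldl (fun d v => d.erase v) d = d.filter (fun p => !(decide (p ∈ I))) := by
  induction I generalizing d with
  | nil => simp
  | cons v I ih =>
    have H' : ∀ w ∈ I, (d.erase v).count w ≤ I.count w := by
      intro w hw
      by_cases hwv : w = v
      · subst hwv
        have h1 := H w (by simp)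
        have h2 : (d.erase w).count w = d.count w - 1 := List.count_erase_self
        have h3 : (w :: I).count w = I.count w + 1 := List.count_cons_self
        omega
      · have h1 := H w (by simp [hw])
        have h2 : (d.erase v).count w = d.count w :=
          List.count_erase_of_ne hwv
        have h3 : (v :: I).count w = I.count w :=
          List.count_cons_of_ne (Ne.symm hwv)
        omega
    rw [List.foldl_cons, ih (d.erase v) H']
    by_cases hvI : v ∈ I
    · rw [pv_filter_erase (fun p => !(decide (p ∈ I))) v d (by simp [hvI])]
      apply List.filter_congr
      intro x hx
      by_cases hxv : x = v
      · simp [hxv, hvI]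
      · simp [hxv]
    · have hcv : d.count v ≤ 1 := by
        have h1 := H v (by simp)
        have h3 : (v :: I).count v = I.count v + 1 := List.count_cons_self
        have h4 : I.count v = 0 := List.count_eq_zero.mpr hvI
        omega
      rw [pv_erase_eq_filter v d hcv, List.filter_filter]
      apply List.filter_congr
      intro x hx
      by_cases hxv : x = v <;> simp [hxv]

-- membership in A's invalid_detections list, characterised by the count over suspects
lemma pv_mem_I (S : List (Int × Int)) (x : Int × Int) :
    x ∈ S.filter (fun s => decide (S.count s > 2)) ↔ S.count x > 2 := by
  rw [List.mem_filter]
  constructor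
  · rintro ⟨-, h⟩; exact of_decide_eq_true h
  · intro h; exact ⟨List.count_pos_iff.mp (by omega), by simpa using h⟩

-- membership in B's invalid set, characterised by the same count
lemma pv_mem_invalid (S : List (Int × Int)) (p : Int × Int) :
    p ∈ PySem.Set.ofList (((PySem.Dict.counter S).items.filter (fun kv => kv.2 > 2)).map (·.1)) ↔
      S.count p > 2 := by
  rw [PySem.Set.mem_ofList, PySem.Dict.items_counter]
  constructor
  · intro hp
    obtain ⟨⟨k, c⟩, hin, rfl⟩ := List.mem_map.mp hp
    obtain ⟨hmemmap, hgt⟩ := List.mem_filter.mp hin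
    obtain ⟨a, _, heq⟩ := List.mem_map.mp hmemmap
    injection heq with h1 h2
    have hc : (2 : Int) < c := of_decide_eq_true hgt
    rw [← h2] at hc
    show S.count k > 2
    rw [← h1]
    exact_mod_cast hc
  · intro h
    refine List.mem_map.mpr ⟨(p, (S.count p : Int)), List.mem_filter.mpr ⟨?_, ?_⟩, rfl⟩
    · exact List.mem_map.mpr ⟨p, (PySem.Set.mem_ofList S p).mpr (List.count_pos_iff.mp (by omega)), rfl⟩
    · simp only [decide_eq_true_eq]
      exact_mod_cast h

-- ===== VERDICT (by name: the statement is the Claim_ definition above) =====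
theorem circle_detector_post_processing_per_camera_spec : Claim_equal_circle_detector_post_processing_per_camera := by
  unfold Claim_equal_circle_detector_post_processing_per_camera
  intro detections _
  unfold Spec_circle_detector_post_processing_per_camera
  unfold circle_detector_post_processing_per_camera circle_detector_post_processing_per_camera_alt
  simp only
  -- A side: suspects = S, the flatten of the multi-point detections
  rw [PySem.List.foldl_ite_eq_foldl_filter (fun d : List (Int × Int) => d.length > 1)
        (fun s d => s ++ d) detections ([] : List (Int × Int)),
      PySem.List.foldl_append_eq_flatten, List.nil_append]
  set S : List (Int × Int) := (detections.filter (fun d => decide (d.length > 1))).flatten with hS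
  rw [PySem.List.foldl_append_ite_eq_filter (fun s => S.count s > 2) S ([] : List (Int × Int)),
      List.nil_append]
  set I : List (Int × Int) := S.filter (fun s => decide (S.count s > 2)) with hI
  rw [pv_foldl_map_comm, PySem.List.foldl_append_singleton_eq_map, List.nil_append, List.map_map]
  -- B side: counts = counter S, then the output map
  rw [PySem.List.foldl_ite_eq_foldl_filter (fun d : List (Int × Int) => d.length > 1)
        (fun (c : PySem.Dict (Int × Int) Int) (d : List (Int × Int)) =>
          d.foldl (fun c p => c.modify p 0 (· + 1)) c) detections PySem.Dict.empty,
      ← List.foldl_flatten, ← hS, ← PySem.Dict.counter_eq_foldl,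
      PySem.List.foldl_append_singleton_eq_map, List.nil_append]
  -- pointwise over detections
  apply List.map_congr_left
  intro d hd
  simp only [Function.comp]
  have hfold : I.foldl (fun d v => if v ∈ d then d.erase v else d) d =
      I.foldl (fun d v => d.erase v) d := by
    apply PySem.List.foldl_congr_mem
    intro acc x _
    by_cases h : x ∈ acc
    · simp [h]
    · simp [h, List.erase_of_not_mem h]
  have H : ∀ v ∈ I, d.count v ≤ I.count v := by
    intro v hv
    have hcount : S.count v > 2 := (pv_mem_I S v).mp (hI ▸ hv)
    have hIc : I.count v = S.count v := by
      rw [hI]; exact List.count_filter (by simpa using hcount)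
    by_cases hlen : d.length > 1
    · have hdmem : d ∈ detections.filter (fun d => decide (d.length > 1)) :=
        List.mem_filter.mpr ⟨hd, by simpa using hlen⟩
      have hle : d.count v ≤ S.count v := by
        rw [hS, List.count_flatten]
        exact List.single_le_sum (fun x _ => Nat.zero_le x) _ (List.mem_map_of_mem hdmem)
      omega
    · have h1 : d.count v ≤ d.length := List.count_le_length
      omega
  have hmem : ∀ x : Int × Int,
      (x ∈ I) ↔
      (x ∈ PySem.Set.ofList (((PySem.Dict.counter S).items.filter (fun kv => kv.2 > 2)).map (·.1))) := by
    intro x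
    rw [pv_mem_invalid S x, hI, pv_mem_I S x]
  rw [hfold, pv_erase_fold I d H]
  have hfe : d.filter (fun p => !(decide (p ∈ I))) =
      d.filter (fun p => !(PySem.Set.contains
        (PySem.Set.ofList (((PySem.Dict.counter S).items.filter (fun kv => kv.2 > 2)).map (·.1))) p)) := by
    apply List.filter_congr
    intro x _
    by_cases hx : x ∈ I
    · simp [hx, ((hmem x).mp hx), PySem.Set.contains_eq_listContains]
    · have : x ∉ PySem.Set.ofList (((PySem.Dict.counter S).items.filter (fun kv => kv.2 > 2)).map (·.1)) :=
        fun hc => hx ((hmem x).mpr hc)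
      simp [hx, this, PySem.Set.contains_eq_listContains]
  rw [hfe]
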